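-- pv_equiv track=rewrite | github.com/asilverlight/Tool-Light | entropy_guided_sample/utils.py | cal_tool_use
-- ===== SOURCE A (Python) =====
-- def cal_tool_use(input):
--     count = 0
--
--     # 统计 <python>, </python> 对
--     python_start = 0
--     while True:
--         python_start = input.find("<python>", python_start)
--         if python_start == -1:
--             break
--         python_end = input.find("</python>", python_start)
--         if python_end == -1:
--             break
--         count += 1
--         python_start = python_end + len('</python>')  # 移动到 </python> 之后
--
--     # 统计 <search>, </search> 对
--     search_start = 0
--     while True:
--         search_start = input.find("<search>", search_start)
--         if search_start == -1:
--             break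
--         search_end = input.find("</search>", search_start)
--         if search_end == -1:
--             break
--         count += 1
--         search_start = search_end + len('</search>')  # 移动到 </search> 之后
--
--     # 统计 ```python, ``` 对
--     code_start = 0
--     while True:
--         code_start = input.find("```python", code_start)
--         if code_start == -1:
--             break
--         code_end = input.find("```", code_start + len('```python'))  # 从 ```python 之后开始查找
--         if code_end == -1:
--             break
--         count += 1
--         code_start = code_end + len('```')  # 移动到 ``` 之后
--
--     return count
-- ===== SOURCE B (Python) =====
-- def cal_tool_use(input):
--     def count_pairs(open_tag, close_tag):
--         total, i, inside = 0, 0, False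
--         while i < len(input):
--             tag = close_tag if inside else open_tag
--             if input.startswith(tag, i):
--                 if inside:
--                     total += 1
--                 inside = not inside
--                 i += len(tag)
--             else:
--                 i += 1
--         return total
--     return (count_pairs("<python>", "</python>")
--             + count_pairs("<search>", "</search>")
--             + count_pairs("```python", "```"))
-- ===== Notes on version B (the rewrite author's own statement) =====
-- stated objective: simpler
-- what changed: Replaces A's three copy-pasted find-and-jump while loops by one generic single left-to-right scan helper with an inside/outside state, called once per tag pair.
import Mathlib
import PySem

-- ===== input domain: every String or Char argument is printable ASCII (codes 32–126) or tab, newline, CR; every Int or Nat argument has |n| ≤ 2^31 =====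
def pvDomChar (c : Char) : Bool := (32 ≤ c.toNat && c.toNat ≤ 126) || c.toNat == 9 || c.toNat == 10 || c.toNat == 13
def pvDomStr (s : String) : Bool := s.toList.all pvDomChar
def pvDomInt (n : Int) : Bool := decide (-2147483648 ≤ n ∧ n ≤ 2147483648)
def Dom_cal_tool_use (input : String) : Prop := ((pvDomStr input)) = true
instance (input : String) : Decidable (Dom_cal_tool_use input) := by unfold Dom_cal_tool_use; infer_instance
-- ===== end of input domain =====

-- B replaces A's three copy-pasted find-and-jump while loops by one generic single
-- left-to-right scan with an inside/outside state, called once per tag pair (objective: simpler).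

-- ===== PORT A =====
-- One loop of A: `start = input.find(opn, start); if -1 break; end = input.find(cls, start + offset);
-- if -1 break; count += 1; start = end + clsLen`.  A repeats this loop body verbatim for the three
-- patterns (offset = 0, 0, len('```python'); clsLen = len of the closing tag, as A writes it).
-- Strings are handled on `toList` (PySem.Chars.findFrom = str.find with a start argument).
-- `fuel` only makes the loop total: each iteration moves `start` past one closing tag, so
-- `l.length + 1` iterations are never exhausted; the fuel-0 branch is unreachable.
def findPairsA (l opn cls : List Char) (offset clsLen : Nat) : Nat → Nat → Int
  | 0, _ => 0
  | fuel + 1, start =>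
    let p := PySem.Chars.findFrom l opn (start : Int)
    if p = -1 then 0
    else
      let e := PySem.Chars.findFrom l cls (p + (offset : Int))
      if e = -1 then 0
      else 1 + findPairsA l opn cls offset clsLen fuel ((e + (clsLen : Int)).toNat)
      -- `e ≥ 0` in this branch, so `.toNat` is exact (Python's `end + clsLen` is a plain Nat here)

def cal_tool_use (input : String) : Int :=
  let l := input.toList
  findPairsA l "<python>".toList "</python>".toList 0 9 (l.length + 1) 0
    + findPairsA l "<search>".toList "</search>".toList 0 9 (l.length + 1) 0
    + findPairsA l "```python".toList "```".toList 9 3 (l.length + 1) 0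

-- ===== PORT B =====
-- B's helper `count_pairs`: one pointer moving left to right with an inside/outside flag;
-- the suffix of the string at the pointer is the recursion argument (`i += len(tag)` becomes
-- `rest.drop (tag.length - 1)`, which is `s.drop tag.length` since both tags are nonempty).
def scanPairs (opn cls : List Char) : List Char → Bool → Int
  | [], _ => 0
  | c :: rest, inside =>
    if inside then
      if cls.isPrefixOf (c :: rest) then 1 + scanPairs opn cls (rest.drop (cls.length - 1)) false
      else scanPairs opn cls rest true
    else
      if opn.isPrefixOf (c :: rest) then scanPairs opn cls (rest.drop (opn.length - 1)) true
      else scanPairs opn cls rest false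
termination_by s _ => s.length
decreasing_by all_goals simp [List.length_drop]

def cal_tool_use_alt (input : String) : Int :=
  scanPairs "<python>".toList "</python>".toList input.toList false
    + scanPairs "<search>".toList "</search>".toList input.toList false
    + scanPairs "```python".toList "```".toList input.toList false

-- ===== PRECONDITION & SPEC =====
def Spec_cal_tool_use (input : String) (out : Int) : Prop := out = cal_tool_use_alt input
instance (input : String) (out : Int) : Decidable (Spec_cal_tool_use input out) := by unfold Spec_cal_tool_use; infer_instance

-- ===== CLAIM (what is proved, stated in full; the proofs are below) =====
def Claim_equal_cal_tool_use : Prop := ∀ (input : String), Dom_cal_tool_use input → Spec_cal_tool_use input (cal_tool_use input)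

-- ===== LEMMAS AND PROOFS =====

-- scanPairs when the sought tag never occurs / first occurs at position n
lemma scan_out_none (opn cls s : List Char) (h : ∀ j, ¬ opn <+: s.drop j) :
    scanPairs opn cls s false = 0 := by
  induction s with
  | nil => rw [scanPairs]
  | cons c rest ih =>
    have h0 : ¬ opn <+: (c :: rest) := by simpa using h 0
    rw [scanPairs]
    simp only [Bool.false_eq_true, if_false]
    rw [if_neg (by simpa [List.isPrefixOf_iff_prefix] using h0)]
    exact ih (fun j => by simpa [List.drop_succ_cons] using h (j + 1))

lemma scan_in_none (opn cls s : List Char) (h : ∀ j, ¬ cls <+: s.drop j) :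
    scanPairs opn cls s true = 0 := by
  induction s with
  | nil => rw [scanPairs]
  | cons c rest ih =>
    have h0 : ¬ cls <+: (c :: rest) := by simpa using h 0
    rw [scanPairs]
    simp only [if_true]
    rw [if_neg (by simpa [List.isPrefixOf_iff_prefix] using h0)]
    exact ih (fun j => by simpa [List.drop_succ_cons] using h (j + 1))

lemma scan_out_first (opn cls : List Char) (ho : opn ≠ []) (s : List Char) (n : Nat)
    (h1 : opn <+: s.drop n) (h2 : ∀ j < n, ¬ opn <+: s.drop j) :
    scanPairs opn cls s false = scanPairs opn cls (s.drop (n + opn.length)) true := by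
  induction n generalizing s with
  | zero =>
    match s with
    | [] => simp at h1; exact absurd h1 ho
    | c :: rest =>
      simp only [List.drop_zero] at h1
      rw [scanPairs]
      simp only [Bool.false_eq_true, if_false]
      rw [if_pos (List.isPrefixOf_iff_prefix.mpr h1)]
      have hol : 1 ≤ opn.length := List.length_pos_iff.mpr ho
      congr 1
      rw [Nat.zero_add, show (c :: rest).drop opn.length = rest.drop (opn.length - 1) from by
        cases hh : opn.length with
        | zero => omega
        | succ k => simp]
  | succ n ih =>
    match s with
    | [] => simp at h1; exact absurd h1 ho
    | c :: rest =>
      have h0 : ¬ opn <+: (c :: rest) := by simpa using h2 0 (by omega)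
      rw [scanPairs]
      simp only [Bool.false_eq_true, if_false]
      rw [if_neg (by simpa [List.isPrefixOf_iff_prefix] using h0)]
      rw [ih rest (by simpa [List.drop_succ_cons] using h1)
        (fun j hj => by simpa [List.drop_succ_cons] using h2 (j + 1) (by omega))]
      congr 1
      simp [List.drop_succ_cons, Nat.succ_add]

lemma scan_in_first (opn cls : List Char) (hc : cls ≠ []) (s : List Char) (n : Nat)
    (h1 : cls <+: s.drop n) (h2 : ∀ j < n, ¬ cls <+: s.drop j) :
    scanPairs opn cls s true = 1 + scanPairs opn cls (s.drop (n + cls.length)) false := by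
  induction n generalizing s with
  | zero =>
    match s with
    | [] => simp at h1; exact absurd h1 hc
    | c :: rest =>
      simp only [List.drop_zero] at h1
      rw [scanPairs]
      simp only [if_true]
      rw [if_pos (List.isPrefixOf_iff_prefix.mpr h1)]
      have hcl : 1 ≤ cls.length := List.length_pos_iff.mpr hc
      congr 2
      rw [Nat.zero_add, show (c :: rest).drop cls.length = rest.drop (cls.length - 1) from by
        cases hh : cls.length with
        | zero => omega
        | succ k => simp]
  | succ n ih =>
    match s with
    | [] => simp at h1; exact absurd h1 hc
    | c :: rest =>
      have h0 : ¬ cls <+: (c :: rest) := by simpa using h2 0 (by omega)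
      rw [scanPairs]
      simp only [if_true]
      rw [if_neg (by simpa [List.isPrefixOf_iff_prefix] using h0)]
      rw [ih rest (by simpa [List.drop_succ_cons] using h1)
        (fun j hj => by simpa [List.drop_succ_cons] using h2 (j + 1) (by omega))]
      congr 2
      simp [List.drop_succ_cons, Nat.succ_add]

-- the generic equivalence: A's find-and-jump loop = B's state-machine scan,
-- provided the closing tag cannot start strictly inside an occurrence of the opening tag
-- beyond `offset` (which is where A resumes its close search).
theorem loopA_eq_scan (opn cls : List Char) (ho : opn ≠ []) (hc : cls ≠ [])
    (offset : Nat) (hoff : offset ≤ opn.length)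
    (Hno : ∀ s : List Char, opn <+: s → ∀ i, offset ≤ i → i < opn.length → ¬ cls <+: s.drop i)
    (l : List Char) (fuel start : Nat) (hstart : start ≤ l.length)
    (hfuel : l.length < fuel + start) :
    findPairsA l opn cls offset cls.length fuel start = scanPairs opn cls (l.drop start) false := by
  induction fuel generalizing start with
  | zero => exact absurd hfuel (by omega)
  | succ fuel ih =>
    have hnoinf : ∀ (t : List Char) (sub : List Char), PySem.Chars.find t sub = -1 →
        ∀ j, ¬ sub <+: t.drop j := by
      intro t sub hft j hpre
      have : sub <:+: t := by
        rw [← PySem.Chars.isIn_iff_infix, ← PySem.Chars.exists_prefix_drop_iff_isIn]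
        exact ⟨j, hpre⟩
      exact absurd hft ((PySem.Chars.find_ne_neg_one_iff t sub).mpr this)
    have ho1 : 1 ≤ opn.length := List.length_pos_iff.mpr ho
    have hc1 : 1 ≤ cls.length := List.length_pos_iff.mpr hc
    rw [findPairsA]
    rw [PySem.Chars.findFrom_natCast l opn start hstart]
    by_cases hf : PySem.Chars.find (l.drop start) opn = -1
    · rw [if_pos (by rw [if_pos hf]), scan_out_none _ _ _ (hnoinf _ _ hf)]
    · have hnn : 0 ≤ PySem.Chars.find (l.drop start) opn := by
        have := PySem.Chars.neg_one_le_find (l.drop start) opn; omega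
      set m := (PySem.Chars.find (l.drop start) opn).toNat with hm
      have hfm : PySem.Chars.find (l.drop start) opn = (m : Int) := by omega
      obtain ⟨hp, hmin⟩ := PySem.Chars.find_spec hnn
      rw [← hm] at hp hmin
      have hpd : opn <+: l.drop (start + m) := by rwa [List.drop_drop] at hp
      have hplen : start + m + opn.length ≤ l.length := by
        have h := hpd.length_le
        rw [List.length_drop] at h
        omega
      rw [if_neg (by rw [if_neg hf, hfm]; omega)]
      rw [if_neg hf]
      have hcast : (start : Int) + PySem.Chars.find (l.drop start) opn + (offset : Int)
          = ((start + m + offset : Nat) : Int) := by push_cast [hfm]; ring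
      rw [hcast, PySem.Chars.findFrom_natCast l cls (start + m + offset) (by omega)]
      by_cases hg : PySem.Chars.find (l.drop (start + m + offset)) cls = -1
      · rw [if_pos (by rw [if_pos hg])]
        rw [scan_out_first opn cls ho _ m hp hmin, List.drop_drop]
        rw [scan_in_none opn cls _ (by
          intro j
          rw [List.drop_drop, show start + (m + opn.length) + j = start + m + offset + (start + (m + opn.length) + j - (start + m + offset)) from by omega]
          have hno := hnoinf _ _ hg (start + (m + opn.length) + j - (start + m + offset))
          rw [List.drop_drop] at hno
          exact hno)]
      · have hgn : 0 ≤ PySem.Chars.find (l.drop (start + m + offset)) cls := by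
          have := PySem.Chars.neg_one_le_find (l.drop (start + m + offset)) cls; omega
        set g := (PySem.Chars.find (l.drop (start + m + offset)) cls).toNat with hgdef
        have hfg : PySem.Chars.find (l.drop (start + m + offset)) cls = (g : Int) := by omega
        obtain ⟨hcp, hcmin⟩ := PySem.Chars.find_spec hgn
        rw [← hgdef] at hcp hcmin
        have hcpd : cls <+: l.drop (start + m + offset + g) := by rwa [List.drop_drop] at hcp
        have hclen : start + m + offset + g + cls.length ≤ l.length := by
          have h2 := hcpd.length_le
          rw [List.length_drop] at h2
          omega
        have hE : start + m + opn.length ≤ start + m + offset + g := by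
          by_contra hlt
          apply Hno (l.drop (start + m)) hpd (offset + g) (by omega) (by omega)
          rw [List.drop_drop, show start + m + (offset + g) = start + m + offset + g from by omega]
          exact hcpd
        rw [if_neg (by rw [if_neg hg, hfg]; omega), if_neg hg]
        rw [scan_out_first opn cls ho _ m hp hmin, List.drop_drop]
        rw [scan_in_first opn cls hc _ (start + m + offset + g - (start + (m + opn.length)))
          (by rw [List.drop_drop, show start + (m + opn.length) + (start + m + offset + g - (start + (m + opn.length))) = start + m + offset + g from by omega]
              exact hcpd)
          (by intro j hj
              rw [List.drop_drop]
              intro hpre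
              apply hcmin (start + (m + opn.length) + j - (start + m + offset)) (by omega)
              rw [List.drop_drop, show start + m + offset + (start + (m + opn.length) + j - (start + m + offset)) = start + (m + opn.length) + j from by omega]
              exact hpre)]
        rw [List.drop_drop]
        rw [show ((start + m + offset : Nat) : Int) + PySem.Chars.find (l.drop (start + m + offset)) cls + (cls.length : Int)
            = ((start + m + offset + g + cls.length : Nat) : Int) from by rw [hfg]; push_cast; ring]
        rw [Int.toNat_natCast]
        rw [ih (start + m + offset + g + cls.length) (by omega) (by omega)]
        rw [show start + (m + opn.length) + (start + m + offset + g - (start + (m + opn.length)) + cls.length) = start + m + offset + g + cls.length from by omega]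


-- the three side conditions
lemma Hno_python : ∀ s : List Char, "<python>".toList <+: s →
    ∀ i, 0 ≤ i → i < "<python>".toList.length → ¬ "</python>".toList <+: s.drop i := by
  intro s hs i _ hlt hcon
  have hls : 8 ≤ s.length := by simpa using hs.length_le
  have hlc : 9 ≤ s.length - i := by simpa using hcon.length_le
  simp only [show "<python>".toList.length = 8 from rfl] at hlt
  rcases Nat.eq_zero_or_pos i with rfl | hpos
  · have a := hcon.getElem (i := 1) (by simp)
    have b := hs.getElem (i := 1) (by simp)
    rw [List.getElem_drop] at a
    simp at a b
    have hab := a.trans b.symm; simp at hab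
  · have a := hcon.getElem (i := 0) (by simp)
    have b := hs.getElem (i := i) (by simp; omega)
    rw [List.getElem_drop] at a
    simp at a b
    have hab := a.trans b.symm
    interval_cases i <;> simp at hab


lemma Hno_search : ∀ s : List Char, "<search>".toList <+: s →
    ∀ i, 0 ≤ i → i < "<search>".toList.length → ¬ "</search>".toList <+: s.drop i := by
  intro s hs i _ hlt hcon
  have hls : 8 ≤ s.length := by simpa using hs.length_le
  have hlc : 9 ≤ s.length - i := by simpa using hcon.length_le
  simp only [show "<search>".toList.length = 8 from rfl] at hlt
  rcases Nat.eq_zero_or_pos i with rfl | hpos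
  · have a := hcon.getElem (i := 1) (by simp)
    have b := hs.getElem (i := 1) (by simp)
    rw [List.getElem_drop] at a
    simp at a b
    have hab := a.trans b.symm; simp at hab
  · have a := hcon.getElem (i := 0) (by simp)
    have b := hs.getElem (i := i) (by simp; omega)
    rw [List.getElem_drop] at a
    simp at a b
    have hab := a.trans b.symm
    interval_cases i <;> simp at hab


lemma Hno_fence : ∀ s : List Char, "```python".toList <+: s →
    ∀ i, 9 ≤ i → i < "```python".toList.length → ¬ "```".toList <+: s.drop i := by
  intro s _ i h9 hlt
  simp at hlt; omega

-- ===== VERDICT (by name: the statement is the Claim_ definition above) =====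
theorem cal_tool_use_spec : Claim_equal_cal_tool_use := by
  intro input _
  unfold Spec_cal_tool_use cal_tool_use cal_tool_use_alt
  have h1 := loopA_eq_scan "<python>".toList "</python>".toList (by decide) (by decide) 0
    (by decide) Hno_python input.toList (input.toList.length + 1) 0 (by omega) (by omega)
  have h2 := loopA_eq_scan "<search>".toList "</search>".toList (by decide) (by decide) 0
    (by decide) Hno_search input.toList (input.toList.length + 1) 0 (by omega) (by omega)
  have h3 := loopA_eq_scan "```python".toList "```".toList (by decide) (by decide) 9
    (by decide) Hno_fence input.toList (input.toList.length + 1) 0 (by omega) (by omega)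
  simp only [List.drop_zero] at h1 h2 h3
  rw [show ("</python>".toList.length) = 9 from rfl] at h1
  rw [show ("</search>".toList.length) = 9 from rfl] at h2
  rw [show ("```".toList.length) = 3 from rfl] at h3
  simp only [h1, h2, h3]
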